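-- pv_equiv track=rewrite | github.com/yeung66/leetcode-everyday | py/mi-1.py | count
-- ===== SOURCE A (Python) =====
-- def count(intervals):
--     ends = []
--     for i in intervals:
--         ends.extend(i)
--
--     ends.sort()
--     cnt  = 0
--     for i in range(len(ends)-1):
--         cnt += ends[i+1] - ends[i]
--
--     return cnt
-- ===== SOURCE B (Python) =====
-- def count(intervals):
--     mn = mx = None
--     for interval in intervals:
--         for x in interval:
--             if mn is None or x < mn:
--                 mn = x
--             if mx is None or x > mx:
--                 mx = x
--     return 0 if mn is None else mx - mn
-- ===== Notes on version B (the rewrite author's own statement) =====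
-- stated objective: faster
-- what changed: The sum of gaps between consecutive sorted endpoints telescopes to max(endpoints) - min(endpoints), so B replaces flatten+sort+adjacent-difference loop by a single pass tracking the running min and max (0 for no endpoints).
import Mathlib
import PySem

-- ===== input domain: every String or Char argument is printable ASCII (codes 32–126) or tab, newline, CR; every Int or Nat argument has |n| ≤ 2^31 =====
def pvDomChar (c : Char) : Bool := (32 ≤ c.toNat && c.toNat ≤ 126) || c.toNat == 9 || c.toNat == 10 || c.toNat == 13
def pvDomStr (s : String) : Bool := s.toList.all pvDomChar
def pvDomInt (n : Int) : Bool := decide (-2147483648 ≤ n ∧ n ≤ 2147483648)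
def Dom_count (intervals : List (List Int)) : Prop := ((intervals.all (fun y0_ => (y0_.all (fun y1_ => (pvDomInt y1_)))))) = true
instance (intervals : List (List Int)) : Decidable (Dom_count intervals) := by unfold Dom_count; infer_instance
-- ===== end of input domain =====

-- B replaces flatten + sort + adjacent-difference loop by a single pass tracking
-- the running min and max (the telescoping sum equals max - min); objective: faster.

-- ===== PORT A =====
def count (intervals : List (List Int)) : Int :=
  let ends := intervals.foldl (fun acc i => acc ++ i) ([] : List Int)
  let ends := PySem.List.sorted ends (fun x => x) false
  (PySem.List.pyRange 0 (PySem.List.len ends - 1)).foldl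
    (fun cnt i => cnt + (PySem.List.pyGetD ends (i + 1) 0 - PySem.List.pyGetD ends i 0)) 0

-- ===== PORT B =====
def countStep (q : Option Int × Option Int) (x : Int) : Option Int × Option Int :=
  let mn := match q.1 with | none => some x | some m => if x < m then some x else some m
  let mx := match q.2 with | none => some x | some m => if x > m then some x else some m
  (mn, mx)

def count_alt (intervals : List (List Int)) : Int :=
  let st := intervals.foldl (fun p interval => interval.foldl countStep p)
      ((none, none) : Option Int × Option Int)
  match st.1, st.2 with
  | some a, some b => b - a
  | _, _ => 0

-- ===== PRECONDITION & SPEC =====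
def Spec_count (intervals : List (List Int)) (out : Int) : Prop := out = count_alt intervals
instance (intervals : List (List Int)) (out : Int) : Decidable (Spec_count intervals out) := by unfold Spec_count; infer_instance

-- ===== CLAIM (what is proved, stated in full; the proofs are below) =====
def Claim_equal_count : Prop := ∀ (intervals : List (List Int)), Dom_count intervals → Spec_count intervals (count intervals)

-- ===== LEMMAS AND PROOFS =====

-- the `ends` accumulation is flatten
theorem foldl_append_flatten (L : List (List Int)) (acc : List Int) :
    L.foldl (fun acc i => acc ++ i) acc = acc ++ L.flatten := by
  induction L generalizing acc with
  | nil => simp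
  | cons h t ih => simp [List.foldl_cons, ih, List.append_assoc]

-- elementwise difference of sums
theorem sum_map_sub_int (R : List Int) (u v : Int → Int) :
    (R.map (fun i => u i - v i)).sum = (R.map u).sum - (R.map v).sum := by
  induction R with
  | nil => simp
  | cons h t ih => simp [ih]; ring

-- telescoping: A's index loop over any list computes last - head
theorem tele (x : Int) (t : List Int) :
    (PySem.List.pyRange 0 (PySem.List.len (x :: t) - 1)).foldl
      (fun cnt i => cnt + (PySem.List.pyGetD (x :: t) (i + 1) 0 - PySem.List.pyGetD (x :: t) i 0)) 0
    = (x :: t).getLast (List.cons_ne_nil x t) - x := by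
  rw [PySem.List.foldl_add]
  rw [sum_map_sub_int]
  have hv : ((PySem.List.pyRange 0 (PySem.List.len (x :: t) - 1)).map
      (fun i => PySem.List.pyGetD (x :: t) i 0)).sum = (x :: t).dropLast.sum := by
    have h1 : PySem.List.len (x :: t) - 1 = PySem.List.len (x :: t).dropLast := by
      simp
    rw [h1]
    have h3 : (PySem.List.pyRange 0 (PySem.List.len (x :: t).dropLast)).map
        (fun i => PySem.List.pyGetD (x :: t) i 0)
        = (PySem.List.pyRange 0 (PySem.List.len (x :: t).dropLast)).map
            (fun j => PySem.List.pyGetD (x :: t).dropLast j 0) := by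
      apply List.map_congr_left
      intro i hi
      obtain ⟨hi0, hi1⟩ := PySem.List.mem_pyRange_one.mp hi
      simp only [PySem.List.len_eq] at hi1
      have hi2 : i < ((x :: t).length : Int) := by
        simp only [List.length_dropLast] at hi1; omega
      rw [PySem.List.pyGetD_eq_getElem _ _ hi0 hi2,
          PySem.List.pyGetD_eq_getElem _ _ hi0 (by exact_mod_cast hi1)]
      rw [List.getElem_dropLast]
    rw [h3, PySem.List.map_pyGetD_pyRange_zero]
  have hu : ((PySem.List.pyRange 0 (PySem.List.len (x :: t) - 1)).map
      (fun i => PySem.List.pyGetD (x :: t) (i + 1) 0)).sum = (x :: t).tail.sum := by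
    have h2 : (PySem.List.pyRange 0 (PySem.List.len (x :: t) - 1)).map
        (fun i => PySem.List.pyGetD (x :: t) (i + 1) 0)
        = (PySem.List.pyRange 1 (PySem.List.len (x :: t))).map
            (fun j => PySem.List.pyGetD (x :: t) j 0) := by
      rw [PySem.List.pyRange_one 0, PySem.List.pyRange_one 1, List.map_map, List.map_map,
          sub_zero]
      apply List.map_congr_left
      intro k _
      simp only [Function.comp_apply]
      congr 1
      ring
    rw [h2, PySem.List.map_pyGetD_pyRange (x :: t) 0 (by norm_num)]
    simp
  rw [hv, hu]
  have h2 : (x :: t).dropLast.sum + (x :: t).getLast (List.cons_ne_nil x t) = (x :: t).sum := by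
    conv_rhs => rw [← List.dropLast_concat_getLast (List.cons_ne_nil x t)]
    simp
  have h3 : (x :: t).sum = x + t.sum := by simp
  have h4 : (x :: t).tail = t := rfl
  rw [h4]
  linarith [h2, h3]

-- B's inner/outer fold over intervals is a fold over the flatten
theorem alt_foldl_flatten (L : List (List Int)) (p : Option Int × Option Int) :
    L.foldl (fun p interval => interval.foldl countStep p) p = L.flatten.foldl countStep p := by
  simp [List.foldl_flatten]

-- once both options are set, the fold computes running min and max
theorem foldl_countStep (E : List Int) (a b : Int) :
    E.foldl countStep (some a, some b) = (some (E.foldl min a), some (E.foldl max b)) := by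
  induction E generalizing a b with
  | nil => rfl
  | cons h t ih =>
      have h1 : countStep (some a, some b) h = (some (min a h), some (max b h)) := by
        simp only [countStep]
        rcases lt_or_ge h a with hc | hc <;> rcases lt_or_ge b h with hd | hd <;>
          simp [hc, hd, min_def, max_def] <;> omega
      simp only [List.foldl_cons, h1, ih]

-- foldl min: value, membership and minimality
theorem foldl_min_spec (t : List Int) (a : Int) :
    t.foldl min a ∈ a :: t ∧ t.foldl min a ≤ a ∧ ∀ y ∈ t, t.foldl min a ≤ y := by
  induction t generalizing a with
  | nil => simp
  | cons h t ih =>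
      obtain ⟨hm, hle, hall⟩ := ih (min a h)
      refine ⟨?_, ?_, ?_⟩
      · simp only [List.foldl_cons]
        rcases List.mem_cons.mp hm with hm | hm
        · rw [hm]; rcases min_choice a h with hc | hc <;> simp [hc]
        · simp [hm]
      · simp only [List.foldl_cons]; exact le_trans hle (min_le_left a h)
      · intro y hy
        simp only [List.foldl_cons]
        rcases List.mem_cons.mp hy with hy0 | hy0
        · rw [hy0]; exact le_trans hle (min_le_right a h)
        · exact hall y hy0

theorem foldl_max_mem (t : List Int) (a : Int) : t.foldl max a ∈ a :: t := by
  induction t generalizing a with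
  | nil => simp
  | cons h t ih =>
      simp only [List.foldl_cons]
      rcases List.mem_cons.mp (ih (max a h)) with hm | hm
      · rw [hm]; rcases max_choice a h with hc | hc <;> simp [hc]
      · simp [hm]

theorem pairwise_le_getLast (l : List Int) (h : l ≠ []) (hp : l.Pairwise (· ≤ ·)) :
    ∀ y ∈ l, y ≤ l.getLast h := by
  revert h hp
  induction l with
  | nil => intro h _; exact absurd rfl h
  | cons a t ih =>
      intro h hp y hy
      cases t with
      | nil => simp at hy; simp [hy, List.getLast]
      | cons b t2 =>
          rw [List.getLast_cons (by simp)]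
          rcases List.mem_cons.mp hy with rfl | hy2
          · exact (List.pairwise_cons.mp hp).1 _ (List.getLast_mem (by simp))
          · exact ih (by simp) (List.pairwise_cons.mp hp).2 y hy2

-- ===== VERDICT (by name: the statement is the Claim_ definition above) =====
theorem count_spec : Claim_equal_count := by
  intro intervals _
  unfold Spec_count count count_alt
  have hE : intervals.foldl (fun acc i => acc ++ i) ([] : List Int) = intervals.flatten := by
    simpa using foldl_append_flatten intervals []
  rw [alt_foldl_flatten, hE]
  cases hF : intervals.flatten with
  | nil => rfl
  | cons x t =>
      have hSne : PySem.List.sorted (x :: t) (fun y => y) false ≠ [] := by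
        simp [PySem.List.sorted_eq_nil_iff]
      obtain ⟨m, t', hS⟩ := List.exists_cons_of_ne_nil hSne
      -- B side evaluates to foldl max x t - foldl min x t
      have hB : (x :: t).foldl countStep ((none, none) : Option Int × Option Int)
          = (some (t.foldl min x), some (t.foldl max x)) := by
        simp only [List.foldl_cons]
        have : countStep (none, none) x = (some x, some x) := rfl
        rw [this, foldl_countStep]
      -- head of sorted = running min
      have hmin : m = t.foldl min x := by
        have hle := PySem.List.key_head_sorted_le (x :: t) (fun y => y) hS
        have hmem : m ∈ x :: t := by
          have : m ∈ PySem.List.sorted (x :: t) (fun y => y) false := by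
            rw [hS]; exact List.mem_cons_self
          exact (PySem.List.mem_sorted _ _ _ _).mp this
        obtain ⟨hfm, hfa, hft⟩ := foldl_min_spec t x
        have h5 : t.foldl min x ≤ m := by
          rcases List.mem_cons.mp hmem with rfl | hm2
          · exact hfa
          · exact hft m hm2
        have h6 : m ≤ t.foldl min x := by
          simpa using hle _ hfm
        omega
      -- last of sorted = running max
      have hmax : (PySem.List.sorted (x :: t) (fun y => y) false).getLast hSne = t.foldl max x := by
        have hp : (PySem.List.sorted (x :: t) (fun y => y) false).Pairwise (· ≤ ·) := by
          exact PySem.List.sorted_pairwise (x :: t) (fun y => y)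
        have hge := pairwise_le_getLast _ hSne hp
        have hgmem : (PySem.List.sorted (x :: t) (fun y => y) false).getLast hSne ∈ x :: t :=
          (PySem.List.mem_sorted _ _ _ _).mp (List.getLast_mem hSne)
        obtain ⟨hfa, hft⟩ := PySem.List.le_foldl_max t x
        have h5 : (PySem.List.sorted (x :: t) (fun y => y) false).getLast hSne ≤ t.foldl max x := by
          rcases List.mem_cons.mp hgmem with he | hm2
          · rw [he]; exact hfa
          · exact hft _ hm2
        have h6 : t.foldl max x ≤ (PySem.List.sorted (x :: t) (fun y => y) false).getLast hSne :=
          hge _ ((PySem.List.mem_sorted _ _ _ _).mpr (foldl_max_mem t x))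
        omega
      rw [hB]
      simp only []
      rw [hS, tele m t']
      have hgl : (m :: t').getLast (List.cons_ne_nil m t')
          = (PySem.List.sorted (x :: t) (fun y => y) false).getLast hSne := by
        congr 1
        · exact hS.symm
      rw [hgl, hmax, ← hmin]
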